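-- pv_equiv track=rewrite | github.com/FlagAI-Open/FlagAI | examples/ca-lora/src/section-4.1/opendelta/opendelta/utils/interactive/web.py | colorfy
-- ===== SOURCE A (Python) =====
-- def colorfy(label):
--     i = 0
--     res = ""
--     while i < len(label):
--         if label[i] == '[':
--             color = ""
--             i += 1
--             while label[i] != ']':
--                 color += label[i]
--                 i += 1
--             i += 1
--             if color[0].isdigit(): # dims but not color
--                 res += f'[{color}]'
--             else:
--                 if res != "": res += '</span>'
--                 res += f'<span style="color: {color}">'
--         else:
--             res += label[i]
--             i += 1
--     res += '</span>'
--     return res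
-- ===== SOURCE B (Python) =====
-- import re
--
-- _TAG = re.compile(r'\[([^\]]*)\]')
--
-- def colorfy(label):
--     # re.split on the tag regex yields literal runs at even indices and
--     # tag bodies (the text between '[' and the next ']') at odd indices.
--     parts = _TAG.split(label)
--     out = [parts[0]]
--     nonempty = bool(parts[0])
--     for i in range(1, len(parts), 2):
--         color = parts[i]
--         if color[:1].isdigit():  # dims but not color
--             out.append('[' + color + ']')
--         else:
--             if nonempty:
--                 out.append('</span>')
--             out.append('<span style="color: ' + color + '">')
--         out.append(parts[i + 1])
--         nonempty = True
--     out.append('</span>')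
--     return ''.join(out)
-- ===== Notes on version B (the rewrite author's own statement) =====
-- stated objective: faster
-- what changed: Replaces A's index-driven character-by-character scan with quadratic `res +=` string accumulation by a regex re.split that tokenizes the label into alternating literal runs and tag bodies in one C-level pass, rendered in one loop over the pairs collecting pieces in a list joined once, with a boolean flag instead of re-testing the accumulated string.
import Mathlib
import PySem

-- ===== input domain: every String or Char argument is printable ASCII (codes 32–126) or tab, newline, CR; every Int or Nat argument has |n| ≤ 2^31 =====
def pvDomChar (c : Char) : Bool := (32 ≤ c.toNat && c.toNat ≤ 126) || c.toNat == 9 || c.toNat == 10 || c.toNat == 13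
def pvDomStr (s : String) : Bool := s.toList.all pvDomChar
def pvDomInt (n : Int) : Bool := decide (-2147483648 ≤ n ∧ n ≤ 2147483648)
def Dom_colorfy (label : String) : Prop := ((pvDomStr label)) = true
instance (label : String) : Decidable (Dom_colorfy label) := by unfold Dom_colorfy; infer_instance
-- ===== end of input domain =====

-- B replaces A's char-by-char scan with quadratic `res +=` accumulation by a regex split into literal runs and tag bodies, rendered in one loop and joined once; Pre_ excludes exactly the labels on which A raises IndexError (an unterminated '[' or an empty '[]').


-- ===== PORT A =====
-- A's while loop over the index i becomes structural recursion over the remaining characters;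
-- the inner `while label[i] != ']'` is the takeWhile/dropWhile split at the first close bracket.
-- The result string is built as a List Char and packed with String.mk at the end.
-- Char.isDigit is exact for str.isdigit on one printable-ASCII character (the stated domain).
def colorfyAux (chars : List Char) (res : List Char) : List Char :=
  match chars with
  | [] => res ++ "</span>".toList
  | c :: rest =>
    if c = '[' then
      let color := rest.takeWhile (fun d => d ≠ ']')
      match hm : rest.dropWhile (fun d => d ≠ ']') with
      | [] => res          -- Python raises IndexError here (unterminated '['); outside Pre_
      | _ :: rest' =>
        match color with
        | [] => res        -- Python raises IndexError on color[0] (empty '[]'); outside Pre_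
        | d :: _ =>
          if d.isDigit then
            colorfyAux rest' (res ++ '[' :: color ++ [']'])
          else
            colorfyAux rest'
              ((if res ≠ [] then res ++ "</span>".toList else res) ++
                "<span style=\"color: ".toList ++ color ++ "\">".toList)
    else colorfyAux rest (res ++ [c])
  termination_by chars.length
  decreasing_by
  · have hle := List.length_dropWhile_le (fun d => d ≠ ']') rest
    rw [hm] at hle; simp at hle ⊢; omega
  · have hle := List.length_dropWhile_le (fun d => d ≠ ']') rest
    rw [hm] at hle; simp at hle ⊢; omega
  · simp

def colorfy (label : String) : String := String.mk (colorfyAux label.toList [])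

-- ===== PORT B =====
-- Port of re.split(r'\[([^\]]*)\]', label): the regex matches at the first '[' that is
-- followed by some ']', the tag body runs to the first ']' after it (it may contain '[');
-- a '[' with no later ']' stays literal (no later '[' can match either).  The result is
-- (leading literal run, list of (tag body, following literal run)) — exactly the even/odd
-- entries of Python's split list.
def pbParts (chars : List Char) : List Char × List (List Char × List Char) :=
  match hm : chars.dropWhile (fun c => c ≠ '[') with
  | [] => (chars, [])
  | _ :: r =>
    if ']' ∈ r then
      let p := pbParts ((r.dropWhile (fun c => c ≠ ']')).tail)
      (chars.takeWhile (fun c => c ≠ '['), (r.takeWhile (fun c => c ≠ ']'), p.1) :: p.2)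
    else (chars, [])
  termination_by chars.length
  decreasing_by
    have hle := List.length_dropWhile_le (fun c => c ≠ '[') chars
    rw [hm] at hle
    simp only [List.length_tail]
    have hle2 := List.length_dropWhile_le (fun c => c ≠ ']') r
    simp at hle hle2 ⊢
    omega

-- B's for loop over the (tag body, literal) pairs; `out` is the list of output pieces,
-- `ne` the nonempty flag; color[:1].isdigit() is the head-digit test.
def pbLoop (pairs : List (List Char × List Char)) (out : List (List Char)) (ne : Bool) :
    List (List Char) :=
  match pairs with
  | [] => out
  | p :: t =>
    pbLoop t
      (if (match p.1 with | d :: _ => d.isDigit | [] => false) then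
         out ++ ['[' :: p.1 ++ [']'], p.2]
       else
         (if ne then out ++ ["</span>".toList] else out) ++
           ["<span style=\"color: ".toList ++ p.1 ++ "\">".toList, p.2])
      true

-- ''.join(out + ['</span>']) is List.flatten of the pieces
def colorfy_alt (label : String) : String :=
  String.mk
    ((pbLoop (pbParts label.toList).2 [(pbParts label.toList).1]
        (decide ((pbParts label.toList).1 ≠ [])) ++ ["</span>".toList]).flatten)

-- ===== PRECONDITION & SPEC =====
-- Pre_ excludes exactly the labels on which A raises IndexError: an unterminated '['
-- (the inner scan runs off the end) or an empty tag '[]' (color[0] on the empty string).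
-- DFA over the characters: state 0 = outside a tag, 1 = just after '[', 2 = inside a tag.
def preAux (chars : List Char) (st : Nat) : Bool :=
  match chars with
  | [] => st == 0
  | c :: rest =>
    if st = 0 then (if c = '[' then preAux rest 1 else preAux rest 0)
    else if st = 1 then (if c = ']' then false else preAux rest 2)
    else if c = ']' then preAux rest 0 else preAux rest 2

def Pre_colorfy (label : String) : Prop := preAux label.toList 0 = true
instance (label : String) : Decidable (Pre_colorfy label) := by unfold Pre_colorfy; infer_instance

def pvWitness_colorfy : String := "[red]hi [a[b] [2]x"

def Spec_colorfy (label : String) (out : String) : Prop := out = colorfy_alt label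
instance (label : String) (out : String) : Decidable (Spec_colorfy label out) := by unfold Spec_colorfy; infer_instance

-- ===== CLAIM (what is proved, stated in full; the proofs are below) =====
def Claim_equal_colorfy : Prop := ∀ (label : String), Dom_colorfy label → Pre_colorfy label → Spec_colorfy label (colorfy label)

-- ===== LEMMAS AND PROOFS =====

lemma colorfyAux_nil (res : List Char) :
    colorfyAux [] res = res ++ "</span>".toList := by rw [colorfyAux]

lemma colorfyAux_lit_step (c : Char) (rest res : List Char) (hc : c ≠ '[') :
    colorfyAux (c :: rest) res = colorfyAux rest (res ++ [c]) := by
  rw [colorfyAux]; simp [hc]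

lemma colorfyAux_tag (rest res : List Char) (d : Char) (ct rest' : List Char)
    (htw : rest.takeWhile (fun x => x ≠ ']') = d :: ct)
    (hdw : rest.dropWhile (fun x => x ≠ ']') = ']' :: rest') :
    colorfyAux ('[' :: rest) res =
      if d.isDigit then
        colorfyAux rest' (res ++ '[' :: (d :: ct) ++ [']'])
      else
        colorfyAux rest'
          ((if res ≠ [] then res ++ "</span>".toList else res) ++
            "<span style=\"color: ".toList ++ (d :: ct) ++ "\">".toList) := by
  rw [colorfyAux]
  split
  · split
    · rename_i heq; rw [hdw] at heq; exact absurd heq (by simp)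
    · rename_i a b heq
      rw [hdw] at heq
      injection heq with h1 h2
      subst h1; subst h2
      simp only [htw]
  · rename_i hcontr; exact absurd rfl hcontr

-- A consumes a bracket-free run character by character
lemma colorfyAux_lit (h rest res : List Char) (hh : ∀ c ∈ h, c ≠ '[') :
    colorfyAux (h ++ rest) res = colorfyAux rest (res ++ h) := by
  induction h generalizing res with
  | nil => simp
  | cons c t ih =>
    rw [List.cons_append, colorfyAux_lit_step c _ _ (hh c (by simp)),
      ih (res ++ [c]) (fun d hd => hh d (by simp [hd]))]
    simp

lemma preAux_append_lit (h d : List Char) (hh : ∀ c ∈ h, c ≠ '[') :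
    preAux (h ++ d) 0 = preAux d 0 := by
  induction h with
  | nil => simp
  | cons c t ih =>
    rw [List.cons_append, preAux]
    simp only [if_neg (hh c (by simp))]
    exact ih (fun x hx => hh x (by simp [hx]))

-- shape of a well-formed tag body, from state 2 on
lemma preAux_two_spec (r : List Char) (hp : preAux r 2 = true) :
    ∃ color r', r = color ++ ']' :: r' ∧ (∀ c ∈ color, c ≠ ']') ∧
      preAux r' 0 = true := by
  induction r with
  | nil => rw [preAux] at hp; simp at hp
  | cons c t ih =>
    rw [preAux] at hp
    simp only [if_neg (by omega : ¬ (2 : Nat) = 0), if_neg (by omega : ¬ (2 : Nat) = 1)] at hp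
    by_cases hc : c = ']'
    · exact ⟨[], t, by simp [hc], by simp, by simpa [if_pos hc] using hp⟩
    · rw [if_neg hc] at hp
      obtain ⟨color, r', hr, hcol, hrest⟩ := ih hp
      refine ⟨c :: color, r', by simp [hr], ?_, hrest⟩
      intro x hx
      rcases List.mem_cons.mp hx with hx | hx
      · exact hx ▸ hc
      · exact hcol x hx

-- shape of a well-formed tag body, from just after the '['
lemma preAux_one_spec (r : List Char) (hp : preAux r 1 = true) :
    ∃ color r', r = color ++ ']' :: r' ∧ color ≠ [] ∧
      (∀ c ∈ color, c ≠ ']') ∧ preAux r' 0 = true := by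
  match r with
  | [] => rw [preAux] at hp; simp at hp
  | c :: t =>
    rw [preAux] at hp
    simp only [if_neg (by omega : ¬ (1 : Nat) = 0)] at hp
    by_cases hc : c = ']'
    · simp [if_pos hc] at hp
    · rw [if_neg hc] at hp
      obtain ⟨color, r', hr, hcol, hrest⟩ := preAux_two_spec t hp
      refine ⟨c :: color, r', by simp [hr], by simp, ?_, hrest⟩
      intro x hx
      rcases List.mem_cons.mp hx with hx | hx
      · exact hx ▸ hc
      · exact hcol x hx

lemma takeWhile_all_append (p : Char → Bool) (a b : List Char) (ha : ∀ c ∈ a, p c = true) :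
    (a ++ b).takeWhile p = a ++ b.takeWhile p := by
  induction a with
  | nil => simp
  | cons c t ih =>
    rw [List.cons_append, List.takeWhile_cons, if_pos (ha c (by simp)),
      ih (fun x hx => ha x (by simp [hx]))]
    rfl

lemma dropWhile_all_append (p : Char → Bool) (a b : List Char) (ha : ∀ c ∈ a, p c = true) :
    (a ++ b).dropWhile p = b.dropWhile p := by
  induction a with
  | nil => simp
  | cons c t ih =>
    rw [List.cons_append, List.dropWhile_cons, if_pos (ha c (by simp)),
      ih (fun x hx => ha x (by simp [hx]))]

lemma tag_takeWhile (color r' : List Char) (hcol : ∀ c ∈ color, c ≠ ']') :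
    (color ++ ']' :: r').takeWhile (fun x => x ≠ ']') = color := by
  rw [takeWhile_all_append _ _ _ (fun c hc => by simp [hcol c hc]), List.takeWhile_cons]
  simp

lemma tag_dropWhile (color r' : List Char) (hcol : ∀ c ∈ color, c ≠ ']') :
    (color ++ ']' :: r').dropWhile (fun x => x ≠ ']') = ']' :: r' := by
  rw [dropWhile_all_append _ _ _ (fun c hc => by simp [hcol c hc]), List.dropWhile_cons]
  simp

lemma dropWhile_cons_head {p : Char → Bool} {l : List Char} {x : Char} {r : List Char}
    (h : l.dropWhile p = x :: r) : p x = false := by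
  have w : l.dropWhile p ≠ [] := by simp [h]
  have := List.head_dropWhile_not p w
  simpa [h] using this

-- equation lemma for pbParts on a label whose first '[' opens a well-formed tag
lemma pbParts_tag (chars : List Char) (color r' : List Char)
    (hd0 : chars.dropWhile (fun c => c ≠ '[') = '[' :: (color ++ ']' :: r'))
    (hcol : ∀ c ∈ color, c ≠ ']') :
    pbParts chars = (chars.takeWhile (fun c => c ≠ '['),
      (color, (pbParts r').1) :: (pbParts r').2) := by
  rw [pbParts.eq_def]
  split
  · rename_i heq; rw [hd0] at heq; exact absurd heq (by simp)
  · rename_i a b heq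
    rw [hd0] at heq
    injection heq with h1 h2
    subst h2
    rw [if_pos (by simp : ']' ∈ color ++ ']' :: r'),
      tag_takeWhile _ _ hcol, tag_dropWhile _ _ hcol]
    simp

lemma flatten_snoc_ne (z : List (List Char)) (w : List Char) (hw : w ≠ []) :
    (z ++ [w]).flatten ≠ [] := by
  simp [List.flatten_append, List.append_eq_nil_iff, hw]

lemma pbParts_nil_case (chars : List Char)
    (h : chars.dropWhile (fun c => c ≠ '[') = []) : pbParts chars = (chars, []) := by
  rw [pbParts.eq_def]; split
  · rfl
  · rename_i heq; rw [h] at heq; exact absurd heq (by simp)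

lemma pbLoop_cons (d : Char) (ct lit : List Char) (t : List (List Char × List Char))
    (out : List (List Char)) (ne : Bool) :
    pbLoop ((d :: ct, lit) :: t) out ne =
      pbLoop t
        (if d.isDigit then out ++ ['[' :: (d :: ct) ++ [']'], lit]
         else
           (if ne then out ++ ["</span>".toList] else out) ++
             ["<span style=\"color: ".toList ++ (d :: ct) ++ "\">".toList, lit])
        true := by
  rw [pbLoop]

-- the main invariant: A's scan with accumulated result = flatten of B's loop pieces
lemma main_lemma (n : Nat) :
    ∀ (chars : List Char), chars.length ≤ n →
    ∀ (out : List (List Char)) (ne : Bool),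
      preAux chars 0 = true →
      (ne = true ↔ out.flatten ≠ []) →
      colorfyAux chars out.flatten =
        (pbLoop (pbParts chars).2 (out ++ [(pbParts chars).1])
            (ne || decide ((pbParts chars).1 ≠ [])) ++ ["</span>".toList]).flatten := by
  induction n with
  | zero =>
    intro chars hlen out ne hpre hne
    have : chars = [] := List.length_eq_zero_iff.mp (Nat.le_zero.mp hlen)
    subst this
    rw [pbParts_nil_case [] (by simp)]
    rw [colorfyAux_nil, pbLoop]
    simp
  | succ n ih =>
    intro chars hlen out ne hpre hne
    have hh0 : ∀ c ∈ chars.takeWhile (fun c => c ≠ '['), c ≠ '[' := by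
      intro c hc; simpa using List.mem_takeWhile_imp hc
    cases hd0 : chars.dropWhile (fun c => c ≠ '[') with
    | nil =>
      have hchars : chars.takeWhile (fun c => c ≠ '[') = chars := by
        have := List.takeWhile_append_dropWhile (p := fun c => c ≠ '[') (l := chars)
        rw [hd0, List.append_nil] at this; exact this
      rw [pbParts_nil_case chars hd0]
      have hlit : ∀ c ∈ chars, c ≠ '[' := hchars ▸ hh0
      have := colorfyAux_lit chars [] out.flatten hlit
      rw [List.append_nil] at this
      rw [this, colorfyAux_nil, pbLoop]
      simp [List.flatten_append]
    | cons x r =>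
      have hx : x = '[' := by
        have := dropWhile_cons_head hd0
        simpa using this
      subst hx
      have hchars : chars = chars.takeWhile (fun c => c ≠ '[') ++ '[' :: r := by
        conv_lhs => rw [← List.takeWhile_append_dropWhile (p := fun c => c ≠ '[') (l := chars)]
        rw [hd0]
      have hpre1 : preAux r 1 = true := by
        rw [hchars, preAux_append_lit _ _ hh0] at hpre
        rw [preAux] at hpre
        simpa using hpre
      obtain ⟨color, r', hr, hcne, hcol, hrest⟩ := preAux_one_spec r hpre1
      subst hr
      obtain ⟨d, ct, rfl⟩ : ∃ d ct, color = d :: ct := by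
        cases color with
        | nil => exact absurd rfl hcne
        | cons a b => exact ⟨a, b, rfl⟩
      have hparts := pbParts_tag chars (d :: ct) r' hd0 hcol
      set h := chars.takeWhile (fun c => c ≠ '[') with hhdef
      -- A side: consume the literal run, then the tag
      have hA : colorfyAux chars out.flatten =
          colorfyAux ('[' :: ((d :: ct) ++ ']' :: r')) (out.flatten ++ h) := by
        conv_lhs => rw [hchars]
        rw [colorfyAux_lit _ _ _ hh0]
      have htagA := colorfyAux_tag ((d :: ct) ++ ']' :: r') (out.flatten ++ h) d ct r'
        (tag_takeWhile _ _ hcol) (tag_dropWhile _ _ hcol)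
      have hlen' : r'.length ≤ n := by
        have hled := List.length_dropWhile_le (fun c => c ≠ '[') chars
        rw [hd0] at hled
        simp [List.length_append] at hled
        omega
      have hinv : (ne || decide (h ≠ [])) = true ↔ (out.flatten ++ h) ≠ [] := by
        simp only [Bool.or_eq_true, decide_eq_true_eq, hne, ne_eq, List.append_eq_nil_iff]
        tauto
      rw [hA, htagA, hparts]
      rw [pbLoop_cons]
      by_cases hdig : d.isDigit = true
      · rw [if_pos hdig, if_pos hdig]
        have hassoc : (out ++ [h]) ++ ['[' :: (d :: ct) ++ [']'], (pbParts r').1] =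
            ((out ++ [h]) ++ ['[' :: (d :: ct) ++ [']']]) ++ [(pbParts r').1] := by simp
        rw [hassoc]
        have hih := ih r' hlen' ((out ++ [h]) ++ ['[' :: (d :: ct) ++ [']']]) true hrest
          (by simp)
        simp only [Bool.true_or] at hih
        rw [← hih]
        simp [List.flatten_append]
      · rw [if_neg hdig, if_neg hdig]
        set piece := "<span style=\"color: ".toList ++ (d :: ct) ++ "\">".toList with hpiece
        have hpne : piece ≠ [] := by rw [hpiece]; simp
        have hassoc :
            (if (ne || decide (h ≠ [])) = true then (out ++ [h]) ++ ["</span>".toList] else out ++ [h])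
              ++ [piece, (pbParts r').1] =
            ((if (ne || decide (h ≠ [])) = true then (out ++ [h]) ++ ["</span>".toList] else out ++ [h])
              ++ [piece]) ++ [(pbParts r').1] := by simp
        rw [hassoc]
        have hih := ih r' hlen'
          ((if (ne || decide (h ≠ [])) = true then (out ++ [h]) ++ ["</span>".toList] else out ++ [h])
            ++ [piece]) true hrest (by simpa using flatten_snoc_ne _ piece hpne)
        simp only [Bool.true_or] at hih
        rw [← hih]
        by_cases hne2 : (out.flatten ++ h) = []
        · rw [if_neg (not_not_intro hne2), if_neg (fun hf => (hinv.mp hf) hne2)]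
          simp [hpiece, List.flatten_append]
        · rw [if_pos hne2, if_pos (hinv.mpr hne2)]
          simp [hpiece, List.flatten_append]

-- ===== VERDICT (by name: the statement is the Claim_ definition above) =====
theorem colorfy_spec : Claim_equal_colorfy := by
  intro label _ hpre
  unfold Spec_colorfy colorfy colorfy_alt
  have := main_lemma label.toList.length label.toList le_rfl [] false hpre (by simp)
  simp only [List.flatten_nil] at this
  rw [this]
  simp
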